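-- pv_equiv track=rewrite | github.com/posl/comment_recommendation | script/mod_gen/1_time/zh/204_D/4.py | solve
-- ===== SOURCE A (Python) =====
-- def solve(n, t):
--     t.sort()
--     t.reverse()
--     t1 = 0
--     t2 = 0
--     for i in range(n):
--         if t1 < t2:
--             t1 += t[i]
--         else:
--             t2 += t[i]
--     return max(t1, t2)
-- ===== SOURCE B (Python) =====
-- def solve(n, t):
--     t.sort()
--     t.reverse()
--     head = t[:max(n, 0)]
--     d = 0
--     for x in head:
--         d = abs(x - d)
--     return (sum(head) + d) // 2
-- ===== Notes on version B (the rewrite author's own statement) =====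
-- stated objective: alternative
-- what changed: Replaces A's index loop over range(n) maintaining the two piles (t1,t2) by slicing the first n sorted elements and folding a single running gap d=abs(x-d), returning the larger pile by the closed form (sum(head)+d)//2.
-- outside the precondition, e.g. on solve(3, [5, 2]): A raises IndexError, B returns 5
import Mathlib
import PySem

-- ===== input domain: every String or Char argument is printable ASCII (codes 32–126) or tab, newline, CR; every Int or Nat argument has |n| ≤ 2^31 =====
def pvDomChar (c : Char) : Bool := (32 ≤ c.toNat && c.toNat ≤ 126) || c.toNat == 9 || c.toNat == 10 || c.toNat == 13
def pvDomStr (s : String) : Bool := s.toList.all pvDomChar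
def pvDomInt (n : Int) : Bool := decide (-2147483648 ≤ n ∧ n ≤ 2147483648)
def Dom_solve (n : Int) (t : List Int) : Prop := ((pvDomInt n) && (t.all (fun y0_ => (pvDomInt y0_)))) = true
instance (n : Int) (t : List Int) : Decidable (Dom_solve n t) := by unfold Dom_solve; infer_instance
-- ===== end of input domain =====

-- B slices the first n descending-sorted elements and folds a single running gap d = |x - d|,
-- returning the larger pile by the closed form (sum + gap) // 2 (alternative decomposition, same cost).
-- Both Pythons sort/reverse t in place; the equivalence proved here is about the return value (the mutation is identical anyway).

-- ===== PORT A =====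
def solve (n : Int) (t : List Int) : Int :=
  let s := (PySem.List.sorted t (fun x => x) false).reverse
  let p := (PySem.List.pyRange 0 n 1).foldl
    (fun (p : Int × Int) i =>
      if p.1 < p.2 then (p.1 + PySem.List.pyGetD s i 0, p.2)
      else (p.1, p.2 + PySem.List.pyGetD s i 0)) (0, 0)
  max p.1 p.2

-- ===== PORT B =====
def solve_alt (n : Int) (t : List Int) : Int :=
  let s := (PySem.List.sorted t (fun x => x) false).reverse
  let head := PySem.List.slice s (some 0) (some (max n 0))
  PySem.Int.floordiv (head.sum + head.foldl (fun d x => |x - d|) 0) 2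

-- ===== PRECONDITION & SPEC =====
-- Pre_ excludes exactly the inputs where Python A raises IndexError (n larger than len(t)).
def Pre_solve (n : Int) (t : List Int) : Prop := n ≤ (t.length : Int)
instance (n : Int) (t : List Int) : Decidable (Pre_solve n t) := by unfold Pre_solve; infer_instance
def pvWitness_solve : Int × List Int := (2, [3, 1])

def Spec_solve (n : Int) (t : List Int) (out : Int) : Prop := out = solve_alt n t
instance (n : Int) (t : List Int) (out : Int) : Decidable (Spec_solve n t out) := by unfold Spec_solve; infer_instance

-- ===== CLAIM (what is proved, stated in full; the proofs are below) =====
def Claim_equal_solve : Prop := ∀ (n : Int) (t : List Int), Dom_solve n t → Pre_solve n t → Spec_solve n t (solve n t)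

-- ===== LEMMAS AND PROOFS =====

-- one greedy step maps the gap |t1 - t2| to |x - gap|
theorem gap_step (x t1 t2 : Int) :
    |x - (|t1 - t2|)| = if t1 < t2 then |t1 + x - t2| else |t1 - (t2 + x)| := by
  split_ifs with h
  · rw [abs_of_neg (by omega : t1 - t2 < 0)]
    congr 1; ring
  · rw [abs_of_nonneg (by omega : (0:Int) ≤ t1 - t2), abs_sub_comm]
    congr 1; ring

-- invariant: A's greedy pile fold has sum = initial sum + list sum, and gap = B's gap fold
theorem greedy_inv (l : List Int) : ∀ (t1 t2 : Int),
    (l.foldl (fun (p : Int × Int) x =>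
        if p.1 < p.2 then (p.1 + x, p.2) else (p.1, p.2 + x)) (t1, t2)).1
      + (l.foldl (fun (p : Int × Int) x =>
        if p.1 < p.2 then (p.1 + x, p.2) else (p.1, p.2 + x)) (t1, t2)).2
      = t1 + t2 + l.sum
    ∧ |(l.foldl (fun (p : Int × Int) x =>
        if p.1 < p.2 then (p.1 + x, p.2) else (p.1, p.2 + x)) (t1, t2)).1
      - (l.foldl (fun (p : Int × Int) x =>
        if p.1 < p.2 then (p.1 + x, p.2) else (p.1, p.2 + x)) (t1, t2)).2|
      = l.foldl (fun d x => |x - d|) (|t1 - t2|) := by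
  induction l with
  | nil => intro t1 t2; simp
  | cons x xs ih =>
    intro t1 t2
    simp only [List.foldl_cons, List.sum_cons]
    rw [gap_step]
    by_cases h : t1 < t2
    · simp only [if_pos h]
      obtain ⟨h1, h2⟩ := ih (t1 + x) t2
      exact ⟨by rw [h1]; ring, h2⟩
    · simp only [if_neg h]
      obtain ⟨h1, h2⟩ := ih t1 (t2 + x)
      exact ⟨by rw [h1]; ring, h2⟩

theorem floordiv_gap (a b : Int) : PySem.Int.floordiv (a + b + |a - b|) 2 = max a b := by
  rw [PySem.Int.floordiv_eq_ediv_of_pos (by norm_num)]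
  rcases le_total a b with h | h
  · rw [abs_of_nonpos (by omega), max_eq_right h,
      show a + b + -(a - b) = 2 * b by ring, Int.mul_ediv_cancel_left _ (by norm_num)]
  · rw [abs_of_nonneg (by omega), max_eq_left h,
      show a + b + (a - b) = 2 * a by ring, Int.mul_ediv_cancel_left _ (by norm_num)]

-- the generic statement on one common list: A's greedy max = B's closed form
theorem greedy_closed (l : List Int) :
    max (l.foldl (fun (p : Int × Int) x =>
          if p.1 < p.2 then (p.1 + x, p.2) else (p.1, p.2 + x)) (0, 0)).1
        (l.foldl (fun (p : Int × Int) x =>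
          if p.1 < p.2 then (p.1 + x, p.2) else (p.1, p.2 + x)) (0, 0)).2
      = PySem.Int.floordiv (l.sum + l.foldl (fun d x => |x - d|) 0) 2 := by
  obtain ⟨h1, h2⟩ := greedy_inv l 0 0
  simp only [zero_add, sub_zero, abs_zero] at h1 h2
  rw [← h1, ← h2, floordiv_gap]

-- ===== VERDICT (by name: the statement is the Claim_ definition above) =====
theorem solve_spec : Claim_equal_solve := by
  intro n t _ hpre
  show _ = solve_alt n t
  unfold solve solve_alt
  simp only []
  unfold Pre_solve at hpre
  set s := (PySem.List.sorted t (fun x => x) false).reverse with hs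
  have hlen : (s.length : Int) = (t.length : Int) := by
    simp [hs, PySem.List.length_sorted]
  by_cases hn : 0 ≤ n
  · have hmax : max n 0 = n := by omega
    have hsl : PySem.List.slice s (some 0) (some (max n 0)) = s.take n.toNat := by
      rw [hmax]
      simp only [PySem.List.slice_zero_start]
      exact PySem.List.slice_to s hn
    have hlenh : ((s.take n.toNat).length : Int) = n := by
      have h' : n.toNat ≤ s.length := by omega
      simp [Nat.min_eq_left h']; omega
    have hcong : (PySem.List.pyRange 0 n 1).foldl
        (fun (p : Int × Int) i =>
          if p.1 < p.2 then (p.1 + PySem.List.pyGetD s i 0, p.2)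
          else (p.1, p.2 + PySem.List.pyGetD s i 0)) (0, 0)
      = (PySem.List.pyRange 0 n 1).foldl
        (fun (p : Int × Int) i =>
          if p.1 < p.2 then (p.1 + PySem.List.pyGetD (s.take n.toNat) i 0, p.2)
          else (p.1, p.2 + PySem.List.pyGetD (s.take n.toNat) i 0)) (0, 0) := by
      apply PySem.List.foldl_congr_mem
      intro acc i hi
      have hi' := (PySem.List.mem_pyRange_one).1 hi
      have hget : PySem.List.pyGetD s i 0 = PySem.List.pyGetD (s.take n.toNat) i 0 := by
        rw [PySem.List.pyGetD_eq_getElem s 0 hi'.1 (by omega),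
          PySem.List.pyGetD_eq_getElem (s.take n.toNat) 0 hi'.1 (by omega)]
        rw [List.getElem_take]
      rw [hget]
    rw [hcong, hsl]
    rw [show PySem.List.pyRange 0 n 1 = PySem.List.pyRange 0 ((s.take n.toNat).length : Int) 1 from by rw [hlenh]]
    rw [PySem.List.foldl_pyRange_zero_pyGetD' (s.take n.toNat) 0
      (fun (p : Int × Int) x => if p.1 < p.2 then (p.1 + x, p.2) else (p.1, p.2 + x)) (0, 0)]
    exact greedy_closed _
  · have hmax : max n 0 = 0 := by omega
    rw [hmax, PySem.List.pyRange_one_eq_nil (by omega)]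
    simp [PySem.List.slice_to s le_rfl, PySem.Int.floordiv]
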